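-- pv_equiv track=rewrite | github.com/arcAman07/TexGuardian | src/texguardian/latex/compiler.py | _unwrap_log_lines
-- ===== SOURCE A (Python) =====
-- _TEX_LOG_LINE_WIDTH = 79
--
-- def _unwrap_log_lines(log: str) -> str:
--     """Rejoin lines that TeX broke at the 79-column boundary.
--
--     TeX hard-wraps its ``.log`` output at 79 characters.  A long warning like
--     ``LaTeX Warning: Reference `fig:very-long-name' ...`` may be split across
--     two (or more) lines.  We detect lines that are *exactly* 79 characters
--     (before the newline) and concatenate them with the following line.
--     """
--     lines = log.split("\n")
--     merged: list[str] = []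
--     i = 0
--     while i < len(lines):
--         current = lines[i]
--         # Keep appending while the line is exactly 79 chars (TeX wrap point)
--         while len(current) >= _TEX_LOG_LINE_WIDTH and i + 1 < len(lines):
--             i += 1
--             current += lines[i]
--         merged.append(current)
--         i += 1
--     return "\n".join(merged)
-- ===== SOURCE B (Python) =====
-- _TEX_LOG_LINE_WIDTH = 79
--
-- def _unwrap_log_lines(log: str) -> str:
--     """Rejoin lines that TeX hard-wrapped at the 79-column boundary."""
--     merged = []
--     wrapped = False  # the previous line hit the wrap width
--     for line in log.split("\n"):
--         if wrapped:
--             merged[-1] += line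
--         else:
--             merged.append(line)
--         wrapped = len(line) >= _TEX_LOG_LINE_WIDTH
--     return "\n".join(merged)
-- ===== Notes on version B (the rewrite author's own statement) =====
-- stated objective: simpler
-- what changed: Replaced A's nested while-loops with manual index bookkeeping by a single for-loop over the lines with a 'previous line was wrapped' flag; B also tests each SOURCE line's length instead of A's ever-growing accumulator.
-- intended difference: On logs where a >=79-char line is later followed (before the last line) by a short line, A's cumulative length test stays true forever so the first long line swallows ALL remaining lines, destroying every later newline; B only glues each >=79-char source line to its successor, which is the unwrapping the docstring describes. — e.g. on _unwrap_log_lines("aaaaaaaaaaaaaaaaaaaaaaaaaaaaaaaaaaaaaaaaaaaaaaaaaaaaaaaaaaaaaaaaaaaaaaaaaaaaaaa\nb\nc"): A returns "aaaaaaaaaaaaaaaaaaaaaaaaaaaaaaaaaaaaaaaaaaaaaaaaaaaaaaaaaaaaaaaaaaaaaaaaaaaaaaabc", B returns "aaaaaaaaaaaaaaaaaaaaaaaaaaaaaaaaaaaaaaaaaaaaaaaaaaaaaaaaaaaaaaaaaaaaaaaaaaaaaaab\nc"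
import Mathlib
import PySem

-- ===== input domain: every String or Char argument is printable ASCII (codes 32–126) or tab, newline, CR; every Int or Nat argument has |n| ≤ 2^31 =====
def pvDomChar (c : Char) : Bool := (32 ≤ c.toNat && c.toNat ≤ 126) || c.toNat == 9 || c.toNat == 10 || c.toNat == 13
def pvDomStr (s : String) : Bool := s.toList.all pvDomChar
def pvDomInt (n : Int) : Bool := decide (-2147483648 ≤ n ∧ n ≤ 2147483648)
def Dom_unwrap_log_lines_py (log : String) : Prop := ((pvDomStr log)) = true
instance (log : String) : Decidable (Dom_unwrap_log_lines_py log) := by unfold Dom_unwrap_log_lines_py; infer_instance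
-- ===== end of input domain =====

-- B replaces A's nested while-loops (index bookkeeping, cumulative-length glue test) by one
-- for-loop with a 'previous line was wrapped' flag; B tests each source line's length, so a
-- wrapped line glues only to its successor instead of swallowing the rest of the log (see D_).

-- ===== PORT A =====
-- the inner `while len(current) >= 79 and i + 1 < len(lines)` loop of A
def pvA_inner : List Char → List (List Char) → List Char × List (List Char)
  | current, [] => (current, [])
  | current, x :: xs =>
    if 79 ≤ current.length then pvA_inner (current ++ x) xs else (current, x :: xs)

-- termination fact the outer loop's recursion needs
theorem pvA_inner_snd_le (current : List Char) (rest : List (List Char)) :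
    (pvA_inner current rest).2.length ≤ rest.length := by
  induction rest generalizing current with
  | nil => simp [pvA_inner]
  | cons x xs ih =>
    simp only [pvA_inner]
    split
    · exact le_trans (ih (current ++ x)) (Nat.le_succ _)
    · simp

-- the outer `while i < len(lines)` loop of A
def pvA_outer : List (List Char) → List (List Char)
  | [] => []
  | c :: rest => (pvA_inner c rest).1 :: pvA_outer (pvA_inner c rest).2
termination_by l => l.length
decreasing_by simpa using Nat.lt_succ_of_le (pvA_inner_snd_le c rest)

def unwrap_log_lines_py (log : String) : String :=
  String.ofList (PySem.Chars.join ['\n'] (pvA_outer (PySem.Chars.splitOn log.toList ['\n'])))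

-- ===== PORT B =====
-- `merged[-1] += line` (merged is never empty when it is used; total on [] for Lean's sake)
def pvSetLastCat : List (List Char) → List Char → List (List Char)
  | [], l => [l]
  | [x], l => [x ++ l]
  | x :: y :: xs, l => x :: pvSetLastCat (y :: xs) l

-- one iteration of B's for-loop; state = (merged, wrapped)
def pvB_step (st : List (List Char) × Bool) (line : List Char) : List (List Char) × Bool :=
  (if st.2 then pvSetLastCat st.1 line else st.1 ++ [line], decide (79 ≤ line.length))

def unwrap_log_lines_py_alt (log : String) : String :=
  String.ofList (PySem.Chars.join ['\n']
    ((PySem.Chars.splitOn log.toList ['\n']).foldl pvB_step ([], false)).1)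

-- ===== PRECONDITION & SPEC =====
-- On logs where a >=79-char line is later followed (before the last line) by a short line,
-- A's cumulative-length test stays true forever so the first long line swallows ALL remaining
-- lines; B glues each >=79-char source line only to its successor, the intended unwrapping.
def D_unwrap_log_lines_py (log : String) : Prop :=
  let lines := PySem.Chars.splitOn log.toList ['\n']
  ∃ j < lines.length - 1, (lines[j]!).length < 79 ∧ ∃ i < j, 79 ≤ (lines[i]!).length
instance (log : String) : Decidable (D_unwrap_log_lines_py log) := by
  unfold D_unwrap_log_lines_py; infer_instance

def Spec_unwrap_log_lines_py (log : String) (out : String) : Prop :=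
  ¬ D_unwrap_log_lines_py log → out = unwrap_log_lines_py_alt log
instance (log : String) (out : String) : Decidable (Spec_unwrap_log_lines_py log out) := by
  unfold Spec_unwrap_log_lines_py; infer_instance

def pvDiffWitness_unwrap_log_lines_py : String :=
  "aaaaaaaaaaaaaaaaaaaaaaaaaaaaaaaaaaaaaaaaaaaaaaaaaaaaaaaaaaaaaaaaaaaaaaaaaaaaaaa\nb\nc"
def pvDiffWitnessOut_unwrap_log_lines_py : String × String :=
  ("aaaaaaaaaaaaaaaaaaaaaaaaaaaaaaaaaaaaaaaaaaaaaaaaaaaaaaaaaaaaaaaaaaaaaaaaaaaaaaabc",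
   "aaaaaaaaaaaaaaaaaaaaaaaaaaaaaaaaaaaaaaaaaaaaaaaaaaaaaaaaaaaaaaaaaaaaaaaaaaaaaaab\nc")

-- ===== CLAIM (what is proved, stated in full; the proofs are below) =====
def Claim_unchanged_unwrap_log_lines_py : Prop := ∀ (log : String), Dom_unwrap_log_lines_py log → Spec_unwrap_log_lines_py log (unwrap_log_lines_py log)
def Claim_changed_unwrap_log_lines_py : Prop := Dom_unwrap_log_lines_py (pvDiffWitness_unwrap_log_lines_py) ∧ D_unwrap_log_lines_py (pvDiffWitness_unwrap_log_lines_py) ∧ unwrap_log_lines_py (pvDiffWitness_unwrap_log_lines_py) = pvDiffWitnessOut_unwrap_log_lines_py.1 ∧ unwrap_log_lines_py_alt (pvDiffWitness_unwrap_log_lines_py) = pvDiffWitnessOut_unwrap_log_lines_py.2 ∧ pvDiffWitnessOut_unwrap_log_lines_py.1 ≠ pvDiffWitnessOut_unwrap_log_lines_py.2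
def Claim_exact_unwrap_log_lines_py : Prop := ∀ (log : String), Dom_unwrap_log_lines_py log → D_unwrap_log_lines_py log → unwrap_log_lines_py log ≠ unwrap_log_lines_py_alt log

-- ===== LEMMAS AND PROOFS =====

theorem pvA_inner_short (current : List Char) (rest : List (List Char))
    (h : current.length < 79) : pvA_inner current rest = (current, rest) := by
  cases rest with
  | nil => rfl
  | cons x xs => simp [pvA_inner, Nat.not_le_of_lt h]

theorem pvA_inner_long (current : List Char) (rest : List (List Char))
    (h : 79 ≤ current.length) : pvA_inner current rest = (current ++ rest.flatten, []) := by
  induction rest generalizing current with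
  | nil => simp [pvA_inner]
  | cons x xs ih =>
    have h' : 79 ≤ (current ++ x).length := by simp; omega
    simp [pvA_inner, h, ih (current ++ x) h', List.append_assoc]

-- A's merge, characterised: the first >=79 line absorbs everything after it
theorem pvA_outer_eq (lines : List (List Char)) :
    pvA_outer lines =
      match lines.findIdx? (fun l => 79 ≤ l.length) with
      | none => lines
      | some idx => lines.take idx ++ [(lines.drop idx).flatten] := by
  induction lines with
  | nil => simp [pvA_outer]
  | cons c rest ih =>
    by_cases hc : 79 ≤ c.length
    · rw [pvA_outer, pvA_inner_long c rest hc]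
      simp [List.findIdx?_cons, hc, pvA_outer]
    · rw [pvA_outer, pvA_inner_short c rest (Nat.lt_of_not_le hc), ih]
      simp only [List.findIdx?_cons, decide_eq_true_eq, hc, if_false]
      cases h : rest.findIdx? (fun l => decide (79 ≤ l.length)) with
      | none => simp
      | some i => simp

theorem pvB_step_true (acc : List (List Char)) (x : List Char) :
    pvB_step (acc, true) x = (pvSetLastCat acc x, decide (79 ≤ x.length)) := by
  simp [pvB_step]

theorem pvB_step_false (acc : List (List Char)) (x : List Char) :
    pvB_step (acc, false) x = (acc ++ [x], decide (79 ≤ x.length)) := by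
  simp [pvB_step]

theorem pvSetLastCat_append (acc : List (List Char)) (prev l : List Char) :
    pvSetLastCat (acc ++ [prev]) l = acc ++ [prev ++ l] := by
  induction acc with
  | nil => rfl
  | cons a as ih =>
    cases as with
    | nil => simp [pvSetLastCat]
    | cons b bs => simpa [pvSetLastCat] using ih

-- once wrapped, B keeps gluing while every consumed line (except possibly the last) is long
theorem pvB_glue_run (rest : List (List Char)) (prev : List Char) (acc : List (List Char))
    (h : ∀ x ∈ rest.dropLast, 79 ≤ x.length) :
    ((rest.foldl pvB_step (acc ++ [prev], true)).1) = acc ++ [prev ++ rest.flatten] := by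
  induction rest generalizing prev with
  | nil => simp
  | cons x xs ih =>
    simp only [List.foldl_cons, pvB_step_true, pvSetLastCat_append]
    cases xs with
    | nil => simp
    | cons y ys =>
      have hx : 79 ≤ x.length := h x (by simp [List.dropLast])
      have : decide (79 ≤ x.length) = true := by simpa using hx
      rw [this]
      rw [ih (prev ++ x) (fun z hz => h z (by simp [List.dropLast] at hz ⊢; tauto))]
      simp [List.append_assoc]

-- "no short line strictly after a long line, last line excepted", in recursion-friendly form
def pvNoD : List (List Char) → Prop
  | [] => True
  | l :: xs => (79 ≤ l.length → ∀ y ∈ xs.dropLast, 79 ≤ y.length) ∧ pvNoD xs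

-- under pvNoD, B's fold computes the same split-point form as A
theorem pvB_eq (lines : List (List Char)) (acc : List (List Char)) (h : pvNoD lines) :
    ((lines.foldl pvB_step (acc, false)).1) =
      acc ++ (match lines.findIdx? (fun l => 79 ≤ l.length) with
      | none => lines
      | some idx => lines.take idx ++ [(lines.drop idx).flatten]) := by
  induction lines generalizing acc with
  | nil => simp
  | cons l xs ih =>
    obtain ⟨h1, h2⟩ := h
    by_cases hl : 79 ≤ l.length
    · have : decide (79 ≤ l.length) = true := by simpa using hl
      simp only [List.foldl_cons, pvB_step_false, this]
      rw [pvB_glue_run xs l acc (h1 hl)]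
      simp [List.findIdx?_cons, hl]
    · have : decide (79 ≤ l.length) = false := by simpa using hl
      simp only [List.foldl_cons, pvB_step_false, this]
      rw [ih (acc ++ [l]) h2]
      simp only [List.findIdx?_cons, decide_eq_true_eq, hl, if_false]
      cases hfi : xs.findIdx? (fun l => decide (79 ≤ l.length)) with
      | none => simp
      | some i => simp

-- index-form ¬D implies the recursion-friendly form
theorem pv_noD_of_not_index (lines : List (List Char))
    (h : ¬ ∃ j < lines.length - 1, (lines[j]!).length < 79 ∧
          ∃ i < j, 79 ≤ (lines[i]!).length) : pvNoD lines := by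
  induction lines with
  | nil => trivial
  | cons l xs ih =>
    refine ⟨?_, ?_⟩
    · intro hl y hy
      by_contra hshort
      obtain ⟨k, hk, hky⟩ := List.mem_iff_getElem.mp hy
      have hklen : k < xs.length - 1 := by
        have := hk; rwa [List.length_dropLast] at this
      refine h ⟨k + 1, by simp; omega, ?_, 0, by omega, ?_⟩
      · have h1 : (l :: xs)[k+1]! = xs[k]! := by
          simp [List.getElem!_cons_succ]
        have h2 : xs[k]! = xs.dropLast[k]! := by
          rw [getElem!_pos xs k (by omega), getElem!_pos xs.dropLast k hk,
            List.getElem_dropLast]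
        rw [h1, h2, getElem!_pos xs.dropLast k hk, hky]; omega
      · simpa [List.getElem!_cons_zero] using hl
    · refine ih ?_
      rintro ⟨j, hj, hshort, i, hij, hlong⟩
      refine h ⟨j + 1, by simp; omega, ?_, i + 1, by omega, ?_⟩
      · rwa [List.getElem!_cons_succ]
      · rwa [List.getElem!_cons_succ]

-- index-form D implies the recursion-friendly positive form
def pvHasSAL : List (List Char) → Prop
  | [] => False
  | x :: xs => (79 ≤ x.length ∧ ∃ y ∈ xs.dropLast, y.length < 79) ∨ pvHasSAL xs

theorem pv_hasSAL_of_index (lines : List (List Char))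
    (h : ∃ j < lines.length - 1, (lines[j]!).length < 79 ∧
          ∃ i < j, 79 ≤ (lines[i]!).length) : pvHasSAL lines := by
  induction lines with
  | nil => obtain ⟨j, hj, _⟩ := h; simp at hj
  | cons l xs ih =>
    obtain ⟨j, hj, hshort, i, hij, hlong⟩ := h
    simp only [List.length_cons] at hj
    cases i with
    | zero =>
      left
      refine ⟨by simpa [List.getElem!_cons_zero] using hlong, ?_⟩
      obtain ⟨k, hk⟩ : ∃ k, j = k + 1 := ⟨j - 1, by omega⟩
      subst hk
      refine ⟨xs[k]!, ?_, ?_⟩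
      · rw [getElem!_pos xs k (by omega)]
        have : xs[k] = xs.dropLast[k]'(by rw [List.length_dropLast]; omega) := by
          rw [List.getElem_dropLast]
        rw [this]; exact List.getElem_mem _
      · rwa [List.getElem!_cons_succ] at hshort
    | succ i' =>
      right
      obtain ⟨k, hk⟩ : ∃ k, j = k + 1 := ⟨j - 1, by omega⟩
      subst hk
      refine ih ⟨k, by omega, ?_, i', by omega, ?_⟩
      · rwa [List.getElem!_cons_succ] at hshort
      · rwa [List.getElem!_cons_succ] at hlong

theorem pv_hasSAL_short (lines : List (List Char)) (h : pvHasSAL lines) :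
    ∃ y ∈ lines.dropLast, y.length < 79 := by
  induction lines with
  | nil => exact h.elim
  | cons x xs ih =>
    rcases h with ⟨_, y, hy, hys⟩ | h'
    · refine ⟨y, ?_, hys⟩
      cases xs with
      | nil => simp at hy
      | cons b bs => simp [List.dropLast] at hy ⊢; tauto
    · obtain ⟨y, hy, hys⟩ := ih h'
      refine ⟨y, ?_, hys⟩
      cases xs with
      | nil => simp at hy
      | cons b bs => simp at hy ⊢; tauto

-- number of output lines B's fold produces
def pvCnt : List (List Char) → Bool → Nat
  | [], _ => 0
  | x :: xs, g => (if g then 0 else 1) + pvCnt xs (decide (79 ≤ x.length))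

theorem pvSetLastCat_length (xs : List (List Char)) (l : List Char) (h : xs ≠ []) :
    (pvSetLastCat xs l).length = xs.length := by
  induction xs with
  | nil => exact absurd rfl h
  | cons a as ih =>
    cases as with
    | nil => rfl
    | cons b bs => simpa [pvSetLastCat] using ih (by simp)

theorem pvSetLastCat_flatten (xs : List (List Char)) (l : List Char) (h : xs ≠ []) :
    (pvSetLastCat xs l).flatten = xs.flatten ++ l := by
  induction xs with
  | nil => exact absurd rfl h
  | cons a as ih =>
    cases as with
    | nil => simp [pvSetLastCat]
    | cons b bs => simp [pvSetLastCat, ih (by simp), List.append_assoc]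

theorem pvB_fold_length (lines : List (List Char)) (acc : List (List Char)) (g : Bool)
    (h : g = true → acc ≠ []) :
    ((lines.foldl pvB_step (acc, g)).1).length = acc.length + pvCnt lines g := by
  induction lines generalizing acc g with
  | nil => simp [pvCnt]
  | cons x xs ih =>
    cases g with
    | false =>
      rw [List.foldl_cons, pvB_step_false, ih (acc ++ [x]) _ (fun _ => by simp)]
      simp [pvCnt]; omega
    | true =>
      rw [List.foldl_cons, pvB_step_true]
      rw [ih (pvSetLastCat acc x) _ (fun _ => by
        cases acc with
        | nil => exact absurd (h rfl) (by simp)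
        | cons a as => cases as <;> simp [pvSetLastCat])]
      rw [pvSetLastCat_length acc x (h rfl)]
      simp [pvCnt]

theorem pvB_fold_flatten (lines : List (List Char)) (acc : List (List Char)) (g : Bool)
    (h : g = true → acc ≠ []) :
    ((lines.foldl pvB_step (acc, g)).1).flatten = acc.flatten ++ lines.flatten := by
  induction lines generalizing acc g with
  | nil => simp
  | cons x xs ih =>
    cases g with
    | false =>
      rw [List.foldl_cons, pvB_step_false, ih (acc ++ [x]) _ (fun _ => by simp)]
      simp [List.append_assoc]
    | true =>
      rw [List.foldl_cons, pvB_step_true]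
      rw [ih (pvSetLastCat acc x) _ (fun _ => by
        cases acc with
        | nil => exact absurd (h rfl) (by simp)
        | cons a as => cases as <;> simp [pvSetLastCat])]
      rw [pvSetLastCat_flatten acc x (h rfl)]
      simp [List.append_assoc]

theorem pvCnt_pos (xs : List (List Char)) (h : xs ≠ []) : 1 ≤ pvCnt xs false := by
  cases xs with
  | nil => exact absurd rfl h
  | cons a as => simp [pvCnt]

theorem pvCnt_pos_of_short (xs : List (List Char)) (g : Bool)
    (h : ∃ y ∈ xs.dropLast, y.length < 79) : 1 ≤ pvCnt xs g := by
  induction xs generalizing g with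
  | nil => simp at h
  | cons a as ih =>
    obtain ⟨y, hy, hys⟩ := h
    cases as with
    | nil => simp at hy
    | cons b bs =>
      simp only [List.dropLast, List.mem_cons] at hy
      rcases hy with rfl | hy
      · have hdec : decide (79 ≤ y.length) = false := by simp; omega
        rw [pvCnt, hdec]
        have := pvCnt_pos (b :: bs) (by simp)
        omega
      · have := ih (decide (79 ≤ a.length)) ⟨y, by simpa [List.dropLast] using hy, hys⟩
        rw [pvCnt]; omega

theorem pvCnt_ge (lines : List (List Char)) (idx : Nat)
    (hidx : lines.findIdx? (fun l => 79 ≤ l.length) = some idx)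
    (h : pvHasSAL lines) : idx + 2 ≤ pvCnt lines false := by
  induction lines generalizing idx with
  | nil => simp at hidx
  | cons x xs ih =>
    by_cases hx : 79 ≤ x.length
    · have : idx = 0 := by
        rw [List.findIdx?_cons] at hidx
        simp [hx] at hidx
        omega
      subst this
      have hs : ∃ y ∈ xs.dropLast, y.length < 79 := by
        rcases h with ⟨_, hy⟩ | h'
        · exact hy
        · exact pv_hasSAL_short xs h'
      have hd : decide (79 ≤ x.length) = true := by simpa using hx
      simp only [pvCnt, hd, if_neg Bool.false_ne_true]
      have := pvCnt_pos_of_short xs true hs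
      omega
    · rw [List.findIdx?_cons] at hidx
      simp only [decide_eq_true_eq, hx, if_false] at hidx
      obtain ⟨k, hk, rfl⟩ := Option.map_eq_some_iff.mp hidx
      have hD : pvHasSAL xs := by
        rcases h with ⟨hxl, _⟩ | h'
        · exact absurd hxl hx
        · exact h'
      have hd : decide (79 ≤ x.length) = false := by simpa using hx
      simp only [pvCnt, hd, if_neg Bool.false_ne_true]
      have := ih k hk hD
      omega

-- length of '\n'.join
theorem pv_join_len (ls : List (List Char)) (h : ls ≠ []) :
    (PySem.Chars.join ['\n'] ls).length = ls.flatten.length + ls.length - 1 := by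
  induction ls with
  | nil => exact absurd rfl h
  | cons x xs ih =>
    cases xs with
    | nil => simp [PySem.Chars.join_singleton]
    | cons y ys =>
      rw [PySem.Chars.join_cons_cons, List.length_append, List.length_cons, ih (by simp)]
      simp only [List.flatten_cons, List.length_append, List.length_cons, List.length_nil]
      omega

-- pvHasSAL gives a long line, hence findIdx? succeeds
theorem pv_hasSAL_long (lines : List (List Char)) (h : pvHasSAL lines) :
    ∃ idx, lines.findIdx? (fun l => 79 ≤ l.length) = some idx := by
  induction lines with
  | nil => exact h.elim
  | cons x xs ih =>
    by_cases hx : 79 ≤ x.length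
    · exact ⟨0, by simp [List.findIdx?_cons, hx]⟩
    · rcases h with ⟨hxl, _⟩ | h'
      · exact absurd hxl hx
      · obtain ⟨k, hk⟩ := ih h'
        exact ⟨k + 1, by simp [List.findIdx?_cons, hx, hk]⟩

theorem pv_findIdx?_lt (lines : List (List Char)) (idx : Nat)
    (h : lines.findIdx? (fun l => 79 ≤ l.length) = some idx) : idx < lines.length := by
  have := List.findIdx?_eq_some_iff_findIdx_eq.mp h
  omega

-- ===== VERDICT (by name: the statements are the Claim_ definitions above) =====
theorem unwrap_log_lines_py_spec : Claim_unchanged_unwrap_log_lines_py := by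
  intro log _
  intro hD
  unfold unwrap_log_lines_py unwrap_log_lines_py_alt
  rw [pvA_outer_eq, pvB_eq _ [] (pv_noD_of_not_index _ (by
    intro hex; exact hD hex))]
  simp

theorem unwrap_log_lines_py_changed : Claim_changed_unwrap_log_lines_py := by
  unfold Claim_changed_unwrap_log_lines_py
  refine ⟨by decide, by decide, ?_, ?_, by decide⟩
  · unfold unwrap_log_lines_py
    rw [pvA_outer_eq]
    decide
  · decide

theorem unwrap_log_lines_py_tight : Claim_exact_unwrap_log_lines_py := by
  intro log _ hD hEq
  unfold unwrap_log_lines_py unwrap_log_lines_py_alt at hEq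
  set lines := PySem.Chars.splitOn log.toList ['\n'] with hlines
  have hSAL : pvHasSAL lines := pv_hasSAL_of_index lines hD
  obtain ⟨idx, hidx⟩ := pv_hasSAL_long lines hSAL
  have hlt := pv_findIdx?_lt lines idx hidx
  have hlistEq : PySem.Chars.join ['\n'] (pvA_outer lines) =
      PySem.Chars.join ['\n'] ((lines.foldl pvB_step ([], false)).1) := by
    have := congrArg String.toList hEq
    simpa using this
  have hlenEq := congrArg List.length hlistEq
  -- A side
  rw [pvA_outer_eq lines, hidx] at hlenEq
  have hAlen : (lines.take idx ++ [(lines.drop idx).flatten]).length = idx + 1 := by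
    simp [List.length_take, Nat.min_eq_left (le_of_lt hlt)]
  have hAflat : (lines.take idx ++ [(lines.drop idx).flatten]).flatten = lines.flatten := by
    rw [List.flatten_append, List.flatten_cons, List.flatten_nil, List.append_nil,
      ← List.flatten_append, List.take_append_drop]
  -- B side
  have hBlen := pvB_fold_length lines [] false (by simp)
  have hBflat := pvB_fold_flatten lines [] false (by simp)
  simp only [List.length_nil, Nat.zero_add, List.flatten_nil, List.nil_append] at hBlen hBflat
  have hlnil : lines ≠ [] := by
    intro hc
    rw [hc] at hSAL
    exact hSAL
  have hcnt := pvCnt_ge lines idx hidx hSAL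
  have hBne : (lines.foldl pvB_step ([], false)).1 ≠ [] := by
    intro hc
    rw [hc] at hBlen
    have := pvCnt_pos lines hlnil
    simp at hBlen
    omega
  rw [pv_join_len _ (by simp), pv_join_len _ hBne] at hlenEq
  rw [hAlen, hAflat, hBlen, hBflat] at hlenEq
  omega
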